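-- pv_equiv track=rewrite | github.com/asouthgate/nbrfind | test_uk2_out.py | get_aln_stats
-- ===== SOURCE A (Python) =====
-- def get_aln_stats(a1,a2):
--     # HERE MN IS POSITIONS WITH N
--     # M IS MATCH OR MISMATCH POSITIONS WITHOUT N
--     snpd = 0
--     NM = 0
--     NN = 0
--     for j in range(len(a1)):
--         c1 = a1[j]
--         c2 = a2[j]
--         if "-" not in [c1,c2]:
--             # not an indel
--             if "N" in [c1,c2]:
--                 NN += 1
--             else:
--                 NM += 1
--                 if c1 != c2: snpd += 1
--     return snpd, NM, NN
-- ===== SOURCE B (Python) =====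
-- def get_aln_stats(a1, a2):
--     # histogram algorithm: tally each column pair once into a dict, then
--     # classify each DISTINCT pair a single time and weight by its multiplicity
--     tally = {}
--     for j in range(len(a1)):
--         p = (a1[j], a2[j])
--         tally[p] = tally.get(p, 0) + 1
--     snpd = NM = NN = 0
--     for (c1, c2), k in tally.items():
--         if c1 == '-' or c2 == '-':
--             continue
--         if c1 == 'N' or c2 == 'N':
--             NN += k
--         else:
--             NM += k
--             if c1 != c2:
--                 snpd += k
--     return snpd, NM, NN
-- ===== Notes on version B (the rewrite author's own statement) =====
-- stated objective: alternative
-- what changed: Replaces A's fused per-position classification loop by a histogram algorithm: one pass tallies column pairs into a dict, then each DISTINCT pair is classified once and its multiplicity added to the statistics.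
import Mathlib
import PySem

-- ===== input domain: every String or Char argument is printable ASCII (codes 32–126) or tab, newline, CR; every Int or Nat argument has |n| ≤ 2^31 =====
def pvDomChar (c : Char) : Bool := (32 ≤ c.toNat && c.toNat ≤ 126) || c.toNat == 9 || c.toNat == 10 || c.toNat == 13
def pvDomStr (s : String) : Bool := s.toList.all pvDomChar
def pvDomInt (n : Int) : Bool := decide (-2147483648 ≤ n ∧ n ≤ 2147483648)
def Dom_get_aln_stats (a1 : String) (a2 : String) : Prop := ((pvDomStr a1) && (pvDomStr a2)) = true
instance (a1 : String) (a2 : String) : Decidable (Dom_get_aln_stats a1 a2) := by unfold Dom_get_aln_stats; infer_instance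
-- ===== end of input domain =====

-- B replaces A's fused per-position counter loop by a histogram algorithm: tally column pairs
-- into a dict, then classify each distinct pair once (alternative decomposition, same cost).


-- ===== PORT A =====
-- A's loop body for one index j: read c1 = a1[j], c2 = a2[j] and update the (snpd, NM, NN) counters.
-- (an out-of-range a2[j] is an IndexError in Python, excluded by Pre_; the 'none' arm never runs under Pre_)
def pvStepA (l1 l2 : List Char) (st : Int × Int × Int) (j : Int) : Int × Int × Int :=
  match PySem.List.pyGet? l1 j, PySem.List.pyGet? l2 j with
  | some c1, some c2 =>
    if c1 ≠ '-' ∧ c2 ≠ '-' then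
      if c1 = 'N' ∨ c2 = 'N' then (st.1, st.2.1, st.2.2 + 1)
      else (if c1 ≠ c2 then st.1 + 1 else st.1, st.2.1 + 1, st.2.2)
    else st
  | _, _ => st

-- one fused loop over j ∈ range(len(a1)) maintaining (snpd, NM, NN)
def get_aln_stats (a1 : String) (a2 : String) : Int × Int × Int :=
  (PySem.List.pyRange 0 a1.toList.length 1).foldl (pvStepA a1.toList a2.toList) (0, 0, 0)

-- ===== PORT B =====
-- the pair p = (a1[j], a2[j]); in Python B an out-of-range j raises (excluded by Pre_), here 'none'
def pvPick (l1 l2 : List Char) (j : Int) : Option (Char × Char) :=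
  match PySem.List.pyGet? l1 j, PySem.List.pyGet? l2 j with
  | some c1, some c2 => some (c1, c2)
  | _, _ => none

-- first loop of B: tally[p] = tally.get(p, 0) + 1 over all column pairs
def pvTally (ps : List (Char × Char)) : PySem.Dict (Char × Char) Int :=
  ps.foldl (fun d p => d.insert p (d.getD p 0 + 1)) PySem.Dict.empty

-- second loop of B: classify each distinct pair once, weighting by its multiplicity k
def pvClassify (st : Int × Int × Int) (it : (Char × Char) × Int) : Int × Int × Int :=
  if it.1.1 = '-' ∨ it.1.2 = '-' then st
  else if it.1.1 = 'N' ∨ it.1.2 = 'N' then (st.1, st.2.1, st.2.2 + it.2)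
  else (if it.1.1 ≠ it.1.2 then st.1 + it.2 else st.1, st.2.1 + it.2, st.2.2)

-- build the pair histogram, then fold the classifier over its items
def get_aln_stats_alt (a1 : String) (a2 : String) : Int × Int × Int :=
  (pvTally ((PySem.List.pyRange 0 a1.toList.length 1).filterMap
      (pvPick a1.toList a2.toList))).items.foldl pvClassify (0, 0, 0)

-- ===== PRECONDITION & SPEC =====
-- Pre_ excludes inputs where a2 is shorter than a1: there Python A (and Python B) raise IndexError.
def Pre_get_aln_stats (a1 : String) (a2 : String) : Prop :=
  a1.toList.length ≤ a2.toList.length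
instance (a1 : String) (a2 : String) : Decidable (Pre_get_aln_stats a1 a2) := by
  unfold Pre_get_aln_stats; infer_instance

def pvWitness_get_aln_stats : String × String := ("ACN-T", "AGNTT")

def Spec_get_aln_stats (a1 : String) (a2 : String) (out : Int × Int × Int) : Prop := out = get_aln_stats_alt a1 a2
instance (a1 : String) (a2 : String) (out : Int × Int × Int) : Decidable (Spec_get_aln_stats a1 a2 out) := by unfold Spec_get_aln_stats; infer_instance

-- ===== CLAIM (what is proved, stated in full; the proofs are below) =====
def Claim_equal_get_aln_stats : Prop := ∀ (a1 : String) (a2 : String), Dom_get_aln_stats a1 a2 → Pre_get_aln_stats a1 a2 → Spec_get_aln_stats a1 a2 (get_aln_stats a1 a2)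

-- ===== LEMMAS AND PROOFS =====

-- the contribution of one column pair to (snpd, NM, NN)
def pvV (p : Char × Char) : Int × Int × Int :=
  if p.1 = '-' ∨ p.2 = '-' then (0, 0, 0)
  else if p.1 = 'N' ∨ p.2 = 'N' then (0, 0, 1)
  else if p.1 ≠ p.2 then (1, 1, 0) else (0, 1, 0)

theorem pvStepA_eq (l1 l2 : List Char) (st : Int × Int × Int) (j : Int) :
    pvStepA l1 l2 st j = match pvPick l1 l2 j with
      | some p => st + pvV p
      | none => st := by
  unfold pvStepA pvPick
  cases h1 : PySem.List.pyGet? l1 j with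
  | none => rfl
  | some c1 =>
    cases h2 : PySem.List.pyGet? l2 j with
    | none => rfl
    | some c2 =>
      simp only [pvV, Prod.ext_iff, Prod.fst_add, Prod.snd_add]
      by_cases g1 : c1 = '-' <;> by_cases g2 : c2 = '-' <;>
        by_cases n1 : c1 = 'N' <;> by_cases n2 : c2 = 'N' <;>
          by_cases hd : c1 = c2 <;> simp [g1, g2, n1, n2, hd]

-- A's fold = initial state + sum of per-pair contributions
theorem pvFoldA_eq_sum (l1 l2 : List Char) (js : List Int) (st : Int × Int × Int) :
    js.foldl (pvStepA l1 l2) st = st + ((js.filterMap (pvPick l1 l2)).map pvV).sum := by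
  induction js generalizing st with
  | nil => simp
  | cons j js ih =>
    simp only [List.foldl_cons, List.filterMap_cons, pvStepA_eq]
    cases h : pvPick l1 l2 j with
    | none => simpa using ih st
    | some p => rw [ih]; simp [add_assoc]

-- B's classifier fold = initial state + weighted sum of per-distinct-pair contributions
theorem pvClassify_eq_sum (L : List ((Char × Char) × Int)) (st : Int × Int × Int) :
    L.foldl pvClassify st = st + (L.map (fun it => it.2 • pvV it.1)).sum := by
  induction L generalizing st with
  | nil => simp
  | cons it L ih =>
    simp only [List.foldl_cons, List.map_cons, List.sum_cons]
    rw [ih, ← add_assoc]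
    congr 1
    unfold pvClassify pvV
    obtain ⟨⟨c1, c2⟩, k⟩ := it
    by_cases g : c1 = '-' ∨ c2 = '-'
    · simp [g]
    · by_cases n : c1 = 'N' ∨ c2 = 'N'
      · simp [g, n, Prod.ext_iff]
      · rw [not_or] at g n
        by_cases hd : c1 = c2 <;>
          simp [g.1, g.2, n.1, n.2, hd, Prod.ext_iff]

-- the derived BEq of Prod and the DecidableEq-induced BEq count alike
theorem pvCount_eq (p : Char × Char) (l : List (Char × Char)) :
    l.count p = @List.count _ instBEqOfDecidableEq p l := by
  induction l with
  | nil => rfl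
  | cons a l ih =>
    simp only [List.count_cons]
    rw [ih]
    by_cases h : a = p <;> simp [h]

-- multiset identity: summing pvV over the list equals the count-weighted sum over the distinct pairs
theorem pvSum_dedup (ps : List (Char × Char)) :
    ((PySem.Set.ofList ps).map (fun p => ((ps.count p : Int)) • pvV p)).sum
      = (ps.map pvV).sum := by
  have hnd : (PySem.Set.ofList ps : List (Char × Char)).Nodup := PySem.Set.nodup_ofList ps
  have htf : (PySem.Set.ofList ps : List (Char × Char)).toFinset = ps.toFinset := by
    ext x; simp [PySem.Set.mem_ofList]
  have hmap : ((PySem.Set.ofList ps).map (fun p => ((ps.count p : Int)) • pvV p))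
      = ((PySem.Set.ofList ps).map (fun p => (ps.count p) • pvV p)) := by
    apply List.map_congr_left
    intro p _
    rw [natCast_zsmul]
  rw [hmap]
  calc ((PySem.Set.ofList ps).map (fun p => (ps.count p) • pvV p)).sum
      = ∑ p ∈ (PySem.Set.ofList ps : List (Char × Char)).toFinset, (ps.count p) • pvV p := by
        rw [List.sum_toFinset _ hnd]
    _ = ∑ p ∈ ps.toFinset, (ps.count p) • pvV p := by rw [htf]
    _ = (ps.map pvV).sum := by
        calc ∑ p ∈ ps.toFinset, (ps.count p) • pvV p
            = ∑ p ∈ ps.toFinset, (@List.count _ instBEqOfDecidableEq p ps) • pvV p := by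
              refine Finset.sum_congr rfl fun p _ => by rw [pvCount_eq]
          _ = (ps.map pvV).sum := (Finset.sum_list_map_count ps pvV).symm

-- ===== VERDICT (by name: the statement is the Claim_ definition above) =====
theorem get_aln_stats_spec : Claim_equal_get_aln_stats := by
  intro a1 a2 _ _
  unfold Spec_get_aln_stats get_aln_stats get_aln_stats_alt
  rw [pvFoldA_eq_sum]
  unfold pvTally
  rw [PySem.Dict.foldl_insert_getD_add_one_eq_counter, PySem.Dict.items_counter]
  rw [pvClassify_eq_sum]
  simp only [List.map_map, Function.comp_def]
  rw [pvSum_dedup]
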